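-- pv_equiv track=rewrite | github.com/takapdayon/atcoder | python/_abc/AtCoderBeginnerContest194/C.py | c194
-- ===== SOURCE A (Python) =====
-- from collections import defaultdict
--
-- def c194(n, al):
--
--     d = defaultdict(int)
--     for i in al:
--         d[str(i)] += 1
--
--     ans = 0
--
--     for i in range(-200, 201):
--         for w in range(i, 201):
--             if i == w:
--                 try:
--                     ans += d[str(i)]* (d[str(w)]-1) * ((i - w) ** 2)
--                 except:
--                     pass
--                 continue
--             try:
--                 ans += d[str(i)]*d[str(w)] * ((i - w) ** 2)
--             except:
--                 pass
--
--     return ans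
-- ===== SOURCE B (Python) =====
-- def c194(n, al):
--     xs = [a for a in al if -200 <= a <= 200]
--     m = len(xs)
--     s1 = sum(xs)
--     s2 = sum(a * a for a in xs)
--     return m * s2 - s1 * s1
-- ===== Notes on version B (the rewrite author's own statement) =====
-- stated objective: faster
-- what changed: Replaces the str-keyed counter dict plus the fixed 401x401 double loop over value pairs with a single pass computing the closed form m*sum(a^2) - (sum a)^2 over the elements in [-200, 200].
import Mathlib
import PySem

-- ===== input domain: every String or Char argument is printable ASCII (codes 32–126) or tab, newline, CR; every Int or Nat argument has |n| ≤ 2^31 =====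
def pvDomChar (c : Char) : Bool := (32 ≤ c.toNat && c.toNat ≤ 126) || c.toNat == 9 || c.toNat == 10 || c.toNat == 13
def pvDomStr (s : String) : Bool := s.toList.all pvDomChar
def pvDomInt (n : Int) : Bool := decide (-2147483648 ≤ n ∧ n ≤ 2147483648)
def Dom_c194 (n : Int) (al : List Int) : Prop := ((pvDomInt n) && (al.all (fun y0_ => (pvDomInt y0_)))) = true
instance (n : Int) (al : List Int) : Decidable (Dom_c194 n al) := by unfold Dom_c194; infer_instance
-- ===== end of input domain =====

-- B replaces A's str-keyed counter plus 401×401 value-pair double loop by the one-pass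
-- closed form m·Σa² − (Σa)² over the elements in [-200, 200]; same return value.

-- ===== PORT A =====
-- literal transliteration of A: defaultdict counter keyed by str(i), then the double range
-- loop; the try/except bodies never raise (defaultdict), so they are ported as plain adds.
def c194 (n : Int) (al : List Int) : Int :=
  let d := al.foldl
    (fun d i => d.insert (PySem.Int.toStr i) (d.getD (PySem.Int.toStr i) 0 + 1))
    (PySem.Dict.empty : PySem.Dict String Int)
  (PySem.List.pyRange (-200) 201 1).foldl (fun ans i =>
    (PySem.List.pyRange i 201 1).foldl (fun ans w =>
      if i = w then
        ans + d.getD (PySem.Int.toStr i) 0 * (d.getD (PySem.Int.toStr w) 0 - 1) * ((i - w) ^ 2)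
      else
        ans + d.getD (PySem.Int.toStr i) 0 * d.getD (PySem.Int.toStr w) 0 * ((i - w) ^ 2)) ans) 0

-- ===== PORT B =====
def c194_alt (n : Int) (al : List Int) : Int :=
  let xs := al.filter (fun a => decide (-200 ≤ a ∧ a ≤ 200))
  let m : Int := xs.length
  let s1 := xs.sum
  let s2 := (xs.map (fun a => a * a)).sum
  m * s2 - s1 * s1

-- ===== PRECONDITION & SPEC =====
def Spec_c194 (n : Int) (al : List Int) (out : Int) : Prop := out = c194_alt n al
instance (n : Int) (al : List Int) (out : Int) : Decidable (Spec_c194 n al out) := by unfold Spec_c194; infer_instance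

-- ===== CLAIM (what is proved, stated in full; the proofs are below) =====
def Claim_equal_c194 : Prop := ∀ (n : Int) (al : List Int), Dom_c194 n al → Spec_c194 n al (c194 n al)

-- ===== LEMMAS AND PROOFS =====

-- decimal decoding of `Nat.toDigits 10`, used only to prove `str` injective
def pvDec (cs : List Char) : Nat := cs.foldl (fun a c => 10 * a + (c.toNat - 48)) 0

theorem pvDigitChar_val {m : Nat} (h : m < 10) : (Nat.digitChar m).toNat - 48 = m := by
  interval_cases m <;> rfl

theorem pvDigitChar_ne {m : Nat} (h : m < 10) : Nat.digitChar m ≠ '-' := by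
  interval_cases m <;> decide

theorem pvDec_append_singleton (cs : List Char) (c : Char) :
    pvDec (cs ++ [c]) = 10 * pvDec cs + (c.toNat - 48) := by
  simp [pvDec, List.foldl_append]

theorem pvDec_toDigits : ∀ n : Nat, pvDec (Nat.toDigits 10 n) = n := by
  intro n
  induction n using Nat.strong_induction_on with
  | _ n ih =>
    rw [Nat.toDigits_eq_if (by norm_num)]
    by_cases h : n < 10
    · simp only [h, if_true]
      simpa [pvDec] using pvDigitChar_val h
    · simp only [h, if_false]
      rw [pvDec_append_singleton, ih (n / 10) (Nat.div_lt_self (by omega) (by norm_num)),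
        pvDigitChar_val (Nat.mod_lt _ (by norm_num))]
      omega

theorem pvToDigits_ne_minus : ∀ n : Nat, ∀ c ∈ Nat.toDigits 10 n, c ≠ '-' := by
  intro n
  induction n using Nat.strong_induction_on with
  | _ n ih =>
    intro c hc
    rw [Nat.toDigits_eq_if (by norm_num)] at hc
    by_cases h : n < 10
    · simp only [h, if_true, List.mem_singleton] at hc
      subst hc; exact pvDigitChar_ne h
    · simp only [h, if_false, List.mem_append, List.mem_singleton] at hc
      rcases hc with hc | hc
      · exact ih (n / 10) (Nat.div_lt_self (by omega) (by norm_num)) c hc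
      · subst hc; exact pvDigitChar_ne (Nat.mod_lt _ (by norm_num))

theorem pvToDigits_inj {a b : Nat} (h : Nat.toDigits 10 a = Nat.toDigits 10 b) : a = b := by
  have := congrArg pvDec h
  rwa [pvDec_toDigits, pvDec_toDigits] at this

theorem pvToChars_inj : Function.Injective PySem.Int.toChars := by
  intro a b h
  unfold PySem.Int.toChars at h
  split_ifs at h with h1 h2 h2
  · have := pvToDigits_inj (List.cons_injective h)
    omega
  · exact absurd (pvToDigits_ne_minus b.toNat '-' (by rw [← h]; exact List.mem_cons_self)) (fun k => k rfl)
  · exact absurd (pvToDigits_ne_minus a.toNat '-' (by rw [h]; exact List.mem_cons_self)) (fun k => k rfl)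
  · have := pvToDigits_inj h
    omega

theorem pvToStr_inj : Function.Injective PySem.Int.toStr := by
  intro a b h
  apply pvToChars_inj
  rw [← PySem.Int.toList_toStr, ← PySem.Int.toList_toStr, h]

-- the counter dict, read back through `str`, is the multiplicity in `al`
theorem pvDict_getD (al : List Int) (v : Int) :
    ((al.foldl
        (fun d i => d.insert (PySem.Int.toStr i) (d.getD (PySem.Int.toStr i) 0 + 1))
        (PySem.Dict.empty : PySem.Dict String Int)).getD (PySem.Int.toStr v) 0)
      = (al.count v : Int) := by
  have hmap : (al.foldl
      (fun d i => d.insert (PySem.Int.toStr i) (d.getD (PySem.Int.toStr i) 0 + 1))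
      (PySem.Dict.empty : PySem.Dict String Int))
      = ((al.map PySem.Int.toStr).foldl
          (fun d x => d.insert x (d.getD x 0 + 1))
          (PySem.Dict.empty : PySem.Dict String Int)) := by
    rw [List.foldl_map]
  rw [hmap, PySem.Dict.foldl_insert_getD_add_one_eq_counter, PySem.Dict.getD_counter]
  norm_cast
  exact List.count_map_of_injective _ _ pvToStr_inj v

-- sum over a step-1 range as a Finset.Icc sum
theorem pvSum_pyRange_aux (f : Int → Int) : ∀ (k : Nat) (a : Int),
    ((PySem.List.pyRange a (a + k) 1).map f).sum = ∑ v ∈ Finset.Icc a (a + k - 1), f v := by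
  intro k
  induction k with
  | zero =>
    intro a
    rw [show a + ((0 : Nat) : Int) = a by simp, PySem.List.pyRange_one_eq_nil le_rfl,
      Finset.Icc_eq_empty (by omega)]
    simp
  | succ k ih =>
    intro a
    have hcast : a + ((k + 1 : Nat) : Int) = (a + k) + 1 := by push_cast; ring
    rw [hcast, PySem.List.pyRange_one_succ_right (by omega), List.map_append, List.sum_append,
      ih a]
    have hins : Finset.Icc a ((a + (k : Int)) + 1 - 1) = insert (a + (k : Int)) (Finset.Icc a (a + (k : Int) - 1)) := by
      ext x; simp only [Finset.mem_Icc, Finset.mem_insert]; omega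
    rw [hins, Finset.sum_insert (by simp only [Finset.mem_Icc]; omega)]
    simp [add_comm]

theorem pvSum_pyRange (f : Int → Int) (a b : Int) :
    ((PySem.List.pyRange a b 1).map f).sum = ∑ v ∈ Finset.Icc a (b - 1), f v := by
  by_cases hab : b ≤ a
  · rw [PySem.List.pyRange_one_eq_nil hab, Finset.Icc_eq_empty (by omega)]
    simp
  · have h := pvSum_pyRange_aux f (b - a).toNat a
    have he : a + (((b - a).toNat : Nat) : Int) = b := by omega
    rw [he] at h
    exact h

-- triangle sum over value pairs equals the closed form
theorem pvTri (c : Int → Int) :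
    (∑ i ∈ Finset.Icc (-200 : Int) 200, ∑ w ∈ Finset.Icc i 200, c i * c w * (i - w) ^ 2)
      = (∑ v ∈ Finset.Icc (-200 : Int) 200, c v) * (∑ v ∈ Finset.Icc (-200 : Int) 200, c v * (v * v))
        - (∑ v ∈ Finset.Icc (-200 : Int) 200, c v * v) * (∑ v ∈ Finset.Icc (-200 : Int) 200, c v * v) := by
  set s : Finset Int := Finset.Icc (-200 : Int) 200 with hs
  set M : Int := ∑ v ∈ s, c v with hM
  set P : Int := ∑ v ∈ s, c v * v with hP
  set Q : Int := ∑ v ∈ s, c v * (v * v) with hQ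
  -- the triangle sum as an ite-sum over the full square
  have htri : (∑ i ∈ s, ∑ w ∈ Finset.Icc i 200, c i * c w * (i - w) ^ 2)
      = ∑ i ∈ s, ∑ w ∈ s, (if i ≤ w then c i * c w * (i - w) ^ 2 else 0) := by
    apply Finset.sum_congr rfl
    intro i hi
    have hi' : -200 ≤ i := by
      rw [hs] at hi; exact (Finset.mem_Icc.mp hi).1
    have hIcc : Finset.Icc i 200 = s.filter (fun w => i ≤ w) := by
      ext x
      rw [hs]
      simp only [Finset.mem_Icc, Finset.mem_filter]
      omega
    rw [hIcc, Finset.sum_filter]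
  -- the transposed ite-sum is the same
  have hswap : (∑ i ∈ s, ∑ w ∈ s, (if w ≤ i then c i * c w * (i - w) ^ 2 else 0))
      = ∑ i ∈ s, ∑ w ∈ s, (if i ≤ w then c i * c w * (i - w) ^ 2 else 0) := by
    rw [Finset.sum_comm]
    apply Finset.sum_congr rfl
    intro i _
    apply Finset.sum_congr rfl
    intro w _
    split
    · ring
    · rfl
  -- the diagonal ite-sum vanishes
  have hdiag : (∑ i ∈ s, ∑ w ∈ s, (if i = w then c i * c w * (i - w) ^ 2 else 0)) = 0 := by
    apply Finset.sum_eq_zero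
    intro i _
    apply Finset.sum_eq_zero
    intro w _
    split
    · rename_i h; subst h; ring
    · rfl
  -- twice the triangle is the full square
  have h2 : (∑ i ∈ s, ∑ w ∈ Finset.Icc i 200, c i * c w * (i - w) ^ 2)
        + (∑ i ∈ s, ∑ w ∈ Finset.Icc i 200, c i * c w * (i - w) ^ 2)
      = ∑ i ∈ s, ∑ w ∈ s, c i * c w * (i - w) ^ 2 := by
    calc (∑ i ∈ s, ∑ w ∈ Finset.Icc i 200, c i * c w * (i - w) ^ 2)
          + (∑ i ∈ s, ∑ w ∈ Finset.Icc i 200, c i * c w * (i - w) ^ 2)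
        = (∑ i ∈ s, ∑ w ∈ s, (if i ≤ w then c i * c w * (i - w) ^ 2 else 0))
          + (∑ i ∈ s, ∑ w ∈ s, (if w ≤ i then c i * c w * (i - w) ^ 2 else 0)) := by
          rw [htri, hswap]
      _ = ∑ i ∈ s, ∑ w ∈ s, ((if i ≤ w then c i * c w * (i - w) ^ 2 else 0)
            + (if w ≤ i then c i * c w * (i - w) ^ 2 else 0)) := by
          simp only [← Finset.sum_add_distrib]
      _ = ∑ i ∈ s, ∑ w ∈ s, (c i * c w * (i - w) ^ 2
            + (if i = w then c i * c w * (i - w) ^ 2 else 0)) := by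
          apply Finset.sum_congr rfl
          intro i _
          apply Finset.sum_congr rfl
          intro w _
          rcases lt_trichotomy i w with h | h | h
          · have h1 : i ≤ w := le_of_lt h
            have h2 : ¬ w ≤ i := not_le.mpr h
            have h3 : ¬ i = w := ne_of_lt h
            simp [h1, h2, h3]
          · subst h; simp
          · have h1 : ¬ i ≤ w := not_le.mpr h
            have h2 : w ≤ i := le_of_lt h
            have h3 : ¬ i = w := (ne_of_lt h).symm
            simp [h1, h2, h3]
      _ = (∑ i ∈ s, ∑ w ∈ s, c i * c w * (i - w) ^ 2)
            + (∑ i ∈ s, ∑ w ∈ s, (if i = w then c i * c w * (i - w) ^ 2 else 0)) := by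
          simp only [Finset.sum_add_distrib]
      _ = ∑ i ∈ s, ∑ w ∈ s, c i * c w * (i - w) ^ 2 := by rw [hdiag, add_zero]
  -- the full square in closed form
  have hfull : (∑ i ∈ s, ∑ w ∈ s, c i * c w * (i - w) ^ 2)
      = (M * Q - P * P) + (M * Q - P * P) := by
    have hpt : ∀ i w : Int, c i * c w * (i - w) ^ 2
        = (c i * (i * i)) * c w - 2 * ((c i * i) * (c w * w)) + c i * (c w * (w * w)) := by
      intro i w; ring
    calc (∑ i ∈ s, ∑ w ∈ s, c i * c w * (i - w) ^ 2)
        = ∑ i ∈ s, ((c i * (i * i)) * M - 2 * ((c i * i) * P) + c i * Q) := by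
          apply Finset.sum_congr rfl
          intro i _
          rw [Finset.sum_congr rfl (fun w _ => hpt i w)]
          rw [Finset.sum_add_distrib, Finset.sum_sub_distrib, ← Finset.mul_sum, ← Finset.mul_sum,
            ← Finset.mul_sum, ← Finset.mul_sum, ← hM, ← hP, ← hQ]
      _ = Q * M - 2 * (P * P) + M * Q := by
          rw [Finset.sum_add_distrib, Finset.sum_sub_distrib, ← Finset.sum_mul, ← Finset.mul_sum,
            ← Finset.sum_mul, ← Finset.sum_mul, ← hM, ← hP, ← hQ]
      _ = (M * Q - P * P) + (M * Q - P * P) := by ring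
  rw [hfull] at h2
  linarith

-- count-weighted sums over the value range are sums over the filtered list
theorem pvWsum (al : List Int) (f : Int → Int) :
    (∑ v ∈ Finset.Icc (-200 : Int) 200, (al.count v : Int) * f v)
      = ((al.filter (fun a => decide (-200 ≤ a ∧ a ≤ 200))).map f).sum := by
  induction al with
  | nil => simp
  | cons a l ih =>
    have hc : ∀ v : Int, ((a :: l).count v : Int) = (l.count v : Int) + if v = a then 1 else 0 := by
      intro v
      rcases eq_or_ne v a with h | h
      · subst h; simp [List.count_cons]
      · simp [h, h.symm]
    simp only [hc, add_mul, Finset.sum_add_distrib, ih]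
    have hite : (∑ v ∈ Finset.Icc (-200 : Int) 200, (if v = a then (1 : Int) else 0) * f v)
        = if a ∈ Finset.Icc (-200 : Int) 200 then f a else 0 := by
      rw [← Finset.sum_ite_eq' (Finset.Icc (-200 : Int) 200) a f]
      apply Finset.sum_congr rfl
      intro v _; split <;> simp
    rw [hite]
    by_cases h : -200 ≤ a ∧ a ≤ 200
    · simp [h, Finset.mem_Icc, add_comm]
    · simp [h, Finset.mem_Icc]

-- A as a double Finset sum over the value range
theorem pvA_eq_sum (n : Int) (al : List Int) :
    c194 n al = ∑ i ∈ Finset.Icc (-200 : Int) 200, ∑ w ∈ Finset.Icc i 200,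
      (al.count i : Int) * (al.count w : Int) * (i - w) ^ 2 := by
  simp only [c194, pvDict_getD]
  have hinner : ∀ i ans : Int,
      (PySem.List.pyRange i 201 1).foldl (fun ans w =>
        if i = w then ans + (al.count i : Int) * ((al.count w : Int) - 1) * ((i - w) ^ 2)
        else ans + (al.count i : Int) * (al.count w : Int) * ((i - w) ^ 2)) ans
      = ans + ((PySem.List.pyRange i 201 1).map (fun w =>
          if i = w then (al.count i : Int) * ((al.count w : Int) - 1) * ((i - w) ^ 2)
          else (al.count i : Int) * (al.count w : Int) * ((i - w) ^ 2))).sum := by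
    intro i ans
    have hb : (fun (ans w : Int) =>
        if i = w then ans + (al.count i : Int) * ((al.count w : Int) - 1) * ((i - w) ^ 2)
        else ans + (al.count i : Int) * (al.count w : Int) * ((i - w) ^ 2))
        = (fun (ans w : Int) => ans +
            (if i = w then (al.count i : Int) * ((al.count w : Int) - 1) * ((i - w) ^ 2)
             else (al.count i : Int) * (al.count w : Int) * ((i - w) ^ 2))) := by
      funext ans w
      split <;> rfl
    rw [hb, PySem.List.foldl_add]
  have houter : (fun (ans i : Int) =>
      (PySem.List.pyRange i 201 1).foldl (fun ans w =>
        if i = w then ans + (al.count i : Int) * ((al.count w : Int) - 1) * ((i - w) ^ 2)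
        else ans + (al.count i : Int) * (al.count w : Int) * ((i - w) ^ 2)) ans)
      = (fun (ans i : Int) => ans + ((PySem.List.pyRange i 201 1).map (fun w =>
          if i = w then (al.count i : Int) * ((al.count w : Int) - 1) * ((i - w) ^ 2)
          else (al.count i : Int) * (al.count w : Int) * ((i - w) ^ 2))).sum) := by
    funext ans i
    exact hinner i ans
  rw [houter, PySem.List.foldl_add, zero_add, pvSum_pyRange]
  norm_num
  apply Finset.sum_congr rfl
  intro i _
  rw [pvSum_pyRange]
  norm_num
  apply Finset.sum_congr rfl
  intro w _
  split
  · rename_i h; subst h; ring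
  · rfl

-- ===== VERDICT (by name: the statement is the Claim_ definition above) =====
theorem c194_spec : Claim_equal_c194 := by
  intro n al _
  unfold Spec_c194 c194_alt
  rw [pvA_eq_sum, pvTri (fun v => (al.count v : Int))]
  simp only []
  rw [pvWsum al (fun v => v * v), pvWsum al (fun v => v)]
  have h1 : (∑ v ∈ Finset.Icc (-200 : Int) 200, (al.count v : Int))
      = ((al.filter (fun a => decide (-200 ≤ a ∧ a ≤ 200))).length : Int) := by
    have := pvWsum al (fun _ => 1)
    simpa using this
  rw [h1]
  have h2 : ((al.filter (fun a => decide (-200 ≤ a ∧ a ≤ 200))).map (fun v => v)).sum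
      = (al.filter (fun a => decide (-200 ≤ a ∧ a ≤ 200))).sum := by simp
  rw [h2]
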